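-- pv_equiv track=rewrite | github.com/Guillermo100472109/Trabajo-CSP-y-B-squeda-2025 | parte-1/aux1.py | make_cols
-- ===== SOURCE A (Python) =====
-- def make_cols(n):
--     columnas = []
--     for i in range(n):
--         inicio = i
--         fin = n * n
--         salto = n
--
--         columnas.append(list(range(inicio, fin, salto)))
--     return columnas
-- ===== SOURCE B (Python) =====
-- def make_cols(n):
--     # Build the n x n grid row-major (row j is j*n .. j*n+n-1), then transpose
--     # it to obtain the columns.
--     rows = [range(j * n, j * n + n) for j in range(n)]
--     return [list(col) for col in zip(*rows)]
-- ===== Notes on version B (the rewrite author's own statement) =====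
-- stated objective: alternative
-- what changed: A builds each column directly as a strided range(i, n*n, n); B builds the n×n grid row-major (rows[j][i] = j*n + i) and transposes it with zip(*rows) to obtain the columns.
import Mathlib
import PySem

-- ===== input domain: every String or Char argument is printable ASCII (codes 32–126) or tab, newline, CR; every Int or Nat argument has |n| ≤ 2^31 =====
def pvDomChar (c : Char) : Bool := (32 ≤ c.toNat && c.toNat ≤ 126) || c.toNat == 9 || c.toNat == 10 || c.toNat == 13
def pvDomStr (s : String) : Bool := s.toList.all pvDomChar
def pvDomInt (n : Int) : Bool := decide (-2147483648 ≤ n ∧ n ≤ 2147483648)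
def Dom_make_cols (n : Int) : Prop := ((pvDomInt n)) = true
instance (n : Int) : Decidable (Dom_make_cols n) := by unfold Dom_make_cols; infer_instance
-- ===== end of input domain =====

-- B replaces A's direct strided-range construction of each column by a
-- build-the-grid-row-major-then-transpose decomposition (alternative, same cost).

-- ===== PORT A =====
-- for i in range(n): columnas.append(list(range(i, n*n, n)))
def make_cols (n : Int) : List (List Int) :=
  (PySem.List.pyRange 0 n 1).foldl
    (fun columnas i => columnas ++ [PySem.List.pyRange i (n * n) n]) []

-- ===== PORT B =====
-- hand port of zip(*rows) for lists of ints: heads of all rows, then recurse on tails,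
-- stopping when the first row (or any row) is exhausted — exact for every list of rows.
def pvHeads? : List (List Int) → Option (List Int)
  | [] => some []
  | [] :: _ => none
  | (x :: _) :: rs => (pvHeads? rs).map (x :: ·)

def pvZipAux : List Int → List (List Int) → List (List Int)
  | [], _ => []
  | x :: xs, rs =>
    match pvHeads? rs with
    | none => []
    | some hs => (x :: hs) :: pvZipAux xs (rs.map (·.tail))

def pvZipStar : List (List Int) → List (List Int)
  | [] => []
  | r :: rs => pvZipAux r rs

-- rows = [range(j*n, j*n + n) for j in range(n)]; return [list(col) for col in zip(*rows)]
def make_cols_alt (n : Int) : List (List Int) :=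
  pvZipStar ((PySem.List.pyRange 0 n 1).map
    (fun j => PySem.List.pyRange (j * n) (j * n + n) 1))

-- ===== PRECONDITION & SPEC =====
def Spec_make_cols (n : Int) (out : List (List Int)) : Prop := out = make_cols_alt n
instance (n : Int) (out : List (List Int)) : Decidable (Spec_make_cols n out) := by unfold Spec_make_cols; infer_instance

-- ===== CLAIM (what is proved, stated in full; the proofs are below) =====
def Claim_equal_make_cols : Prop := ∀ (n : Int), Dom_make_cols n → Spec_make_cols n (make_cols n)

-- ===== LEMMAS AND PROOFS =====

-- heads of a list of rows that are all nonempty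
theorem pvHeads?_cons (ps : List (Int × List Int)) :
    pvHeads? (ps.map (fun p => p.1 :: p.2)) = some (ps.map (·.1)) := by
  induction ps with
  | nil => rfl
  | cons p ps ih => simp [pvHeads?, ih]

-- core transpose characterisation: zipping equal-length rows (range N).map g gives,
-- for each k < N, the list of k-th entries of the rows.
theorem pvZipAux_ranges (N : Nat) (f : Nat → Int) (fs : List (Nat → Int)) :
    pvZipAux ((List.range N).map f) (fs.map (fun g => (List.range N).map g))
      = (List.range N).map (fun k => f k :: fs.map (fun g => g k)) := by
  induction N generalizing f fs with
  | zero => simp [pvZipAux]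
  | succ N ih =>
    rw [List.range_succ_eq_map]
    simp only [List.map_cons, List.map_map, Function.comp_def]
    rw [pvZipAux]
    have hh := pvHeads?_cons (ps := fs.map (fun g =>
      (g 0, (List.range N).map (fun x => g (Nat.succ x)))))
    simp only [List.map_map, Function.comp_def] at hh
    rw [hh]
    have htails : (fs.map (fun g => g 0 :: (List.range N).map fun x => g (Nat.succ x))).map
        (·.tail) = (fs.map (fun g => fun x => g (Nat.succ x))).map
          (fun g => (List.range N).map g) := by
      simp [List.map_map, Function.comp_def]
    rw [htails, ih (fun x => f (Nat.succ x)) (fs.map (fun g => fun x => g (Nat.succ x)))]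
    simp [Function.comp_def, List.map_map]

theorem pvZipStar_ranges (N : Nat) (fs : List (Nat → Int)) (hfs : fs ≠ []) :
    pvZipStar (fs.map (fun g => (List.range N).map g))
      = (List.range N).map (fun k => fs.map (fun g => g k)) := by
  cases fs with
  | nil => exact absurd rfl hfs
  | cons f fs =>
    simp only [List.map_cons]
    rw [pvZipStar, pvZipAux_ranges N f fs]

-- A's column i for 0 < n, 0 ≤ i < n: range(i, n*n, n) = [i + n*j for j in range(n)]
theorem pyRange_col (n : Int) (hn : 0 < n) (i : Int) (h0 : 0 ≤ i) (hi : i < n) :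
    PySem.List.pyRange i (n * n) n
      = (List.range n.toNat).map (fun (j : Nat) => i + n * (j : Int)) := by
  have hnn : i < n * n := lt_of_lt_of_le hi (le_mul_of_one_le_left (le_of_lt hn) hn)
  have key : ((n * n - i + n - 1) / n).toNat = n.toNat := by
    have hr : n * n - i + n - 1 = (n - 1 - i) + n * n := by ring
    rw [hr, Int.add_mul_ediv_left _ _ (ne_of_gt hn),
      Int.ediv_eq_zero_of_lt (by omega) (by omega), zero_add]
  rw [PySem.List.pyRange_of_pos _ _ hn, if_pos hnn, key]

theorem make_cols_eq (n : Int) (hn : 0 < n) :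
    make_cols n = (List.range n.toNat).map
      (fun (k : Nat) => (List.range n.toNat).map (fun (j : Nat) => (k : Int) + n * (j : Int))) := by
  unfold make_cols
  rw [PySem.List.foldl_append_singleton_eq_map, PySem.List.pyRange_one]
  simp only [sub_zero, List.map_map, Function.comp_def, zero_add, List.nil_append]
  refine List.map_congr_left (fun k hk => ?_)
  rw [List.mem_range] at hk
  rw [pyRange_col n hn _ (Int.natCast_nonneg k) (by omega)]

theorem make_cols_alt_eq (n : Int) (hn : 0 < n) :
    make_cols_alt n = (List.range n.toNat).map
      (fun (k : Nat) => (List.range n.toNat).map (fun (j : Nat) => (j : Int) * n + (k : Int))) := by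
  unfold make_cols_alt
  simp only [PySem.List.pyRange_one, sub_zero, add_sub_cancel_left,
    List.map_map, Function.comp_def, zero_add]
  have hgrid : (List.range n.toNat).map
      (fun (j : Nat) => (List.range n.toNat).map (fun (i : Nat) => (j : Int) * n + (i : Int)))
      = ((List.range n.toNat).map (fun (j : Nat) => fun (i : Nat) => (j : Int) * n + (i : Int))).map
        (fun g => (List.range n.toNat).map g) := by
    simp [List.map_map, Function.comp_def]
  rw [hgrid, pvZipStar_ranges n.toNat _ (by
    simp only [ne_eq, List.map_eq_nil_iff, List.range_eq_nil]
    omega)]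
  simp [List.map_map, Function.comp_def]

-- ===== VERDICT (by name: the statement is the Claim_ definition above) =====
theorem make_cols_spec : Claim_equal_make_cols := by
  intro n _
  unfold Spec_make_cols
  by_cases hn : 0 < n
  · rw [make_cols_eq n hn, make_cols_alt_eq n hn]
    refine List.map_congr_left (fun k _ => List.map_congr_left (fun j _ => by ring))
  · have h : PySem.List.pyRange 0 n 1 = [] :=
      PySem.List.pyRange_one_eq_nil (by omega)
    unfold make_cols make_cols_alt
    rw [h]
    rfl
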